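-- pv_equiv track=rewrite | github.com/F-Marchal/SnpHeatMap | scripts/snp_analyser.py | compile_gene_snp
-- ===== SOURCE A (Python) =====
-- def compile_gene_snp(genes_snp: iter, dict_of_number: dict[int, dict[str, int]] = None,
--                      group: str = "None") -> dict[int, dict[str, int]]:
--     """!
--     @brief Extract the number of snp of all genes contained in @p genes_snp (snp = @p genes_snp 's values).
--     Each number of snp is stored inside a new dictionary (@p dict_of_number 's keys). A dict is created in front
--     of all keys (i.e. snp number). This dict contain the @p group (key) and the number of occurrences of this
--     snp number for this key.
--
--     @param genes_snp : iterable => A generator from @ref extract_data_from_table.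
--         e.g. (number_of_snp_in_gene_1, ) =>  @code (3, 5, 3)  @endcode
--         @note Values (number of snp) inside this dict are trans typed into integers.
--     @param dict_of_number : dict[int, dict[str,int]] = None.
--         A dict with the same structure as dictionaries returned by this function.
--     @param group : str = "None" => Each occurrence of a number of snp increment the counter related to this group.
--
--     @return dict[int, dict[str, int]] => A dictionary that store all number of snp found along with the number of
--     occurrences @code {number_of_snp_1 : {group1: number_of_occurrences_of_number_of_snp_1_in_this_group} @endcode
--
--     @warning values @p genes_snp are cast into integer. Also, there is no verification made to see if the values are
--     positive. We assume that data has been filtered using @ref filter_integer_greater_or_equal_to_0 in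
--     @ref extract_data_from_table
--     """
--     dict_of_number = {} if dict_of_number is None else dict_of_number
--
--     for _, snp_count in genes_snp:
--         snp_count = int(snp_count)
--
--         # Add this 'snp_count' to dict_of_number
--         if snp_count not in dict_of_number:
--             dict_of_number[snp_count] = {}
--
--         # Add this 'group' to dict_of_number[snp_count]
--         if group not in dict_of_number[snp_count]:
--             dict_of_number[snp_count][group] = 0
--
--         dict_of_number[snp_count][group] += 1
--
--     return dict_of_number
-- ===== SOURCE B (Python) =====
-- def compile_gene_snp(genes_snp, dict_of_number=None, group="None"):
--     """Non-mutating rewrite: tally snp counts once, then BUILD A FRESH result dict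
--     (updated copies of the existing entries, then the new keys in first-occurrence
--     order). Unlike the original it does not mutate dict_of_number; return values agree."""
--     base = {} if dict_of_number is None else dict_of_number
--
--     # tally every snp count
--     occ = {}
--     for _, snp_count in genes_snp:
--         snp_count = int(snp_count)
--         occ[snp_count] = occ.get(snp_count, 0) + 1
--
--     result = {}
--     # existing entries, updated where their key was tallied
--     for key, inner in base.items():
--         c = occ.get(key, 0)
--         if c == 0:
--             result[key] = dict(inner)
--         elif group in inner:
--             result[key] = {g: (v + c if g == group else v) for g, v in inner.items()}
--         else:
--             result[key] = {**inner, group: c}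
--     # brand-new keys, in first-occurrence order
--     for key, c in occ.items():
--         if key not in base:
--             result[key] = {group: c}
--     return result
-- ===== Notes on version B (the rewrite author's own statement) =====
-- stated objective: alternative
-- what changed: Instead of mutating the dictionary entry-by-entry per gene, B tallies all snp counts once and then builds a fresh result dict in one constructive pass: each existing entry is rewritten (unchanged / group bumped / group appended) and the brand-new keys are appended afterwards in first-occurrence order; B does not mutate dict_of_number (the equivalence is about the return value).
import Mathlib
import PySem

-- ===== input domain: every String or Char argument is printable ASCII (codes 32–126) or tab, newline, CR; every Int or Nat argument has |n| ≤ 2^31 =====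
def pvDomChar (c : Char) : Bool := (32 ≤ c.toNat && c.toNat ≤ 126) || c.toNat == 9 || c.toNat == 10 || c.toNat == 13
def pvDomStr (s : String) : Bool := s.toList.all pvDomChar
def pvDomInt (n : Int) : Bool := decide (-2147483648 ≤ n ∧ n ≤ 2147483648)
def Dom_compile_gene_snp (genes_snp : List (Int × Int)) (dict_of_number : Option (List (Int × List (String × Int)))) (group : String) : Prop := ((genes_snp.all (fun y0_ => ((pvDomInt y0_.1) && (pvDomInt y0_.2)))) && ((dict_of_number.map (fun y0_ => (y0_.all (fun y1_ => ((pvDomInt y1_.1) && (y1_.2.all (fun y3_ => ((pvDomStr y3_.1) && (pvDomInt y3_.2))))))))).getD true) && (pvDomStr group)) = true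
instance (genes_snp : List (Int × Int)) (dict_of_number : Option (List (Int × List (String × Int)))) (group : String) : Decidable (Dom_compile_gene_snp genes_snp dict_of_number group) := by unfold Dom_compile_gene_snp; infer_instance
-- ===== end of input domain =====

-- ===== PORT A =====
-- B builds a fresh result dict from a one-pass tally instead of mutating dict_of_number per gene
-- (alternative decomposition, same cost). A mutates dict_of_number in place, B does not:
-- the equivalence proved here is about the RETURN value only.
def compile_gene_snp (genes_snp : List (Int × Int)) (dict_of_number : Option (List (Int × List (String × Int)))) (group : String) : List (Int × List (String × Int)) :=
  -- dict_of_number = {} if dict_of_number is None else dict_of_number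
  let d0 : PySem.Dict Int (PySem.Dict String Int) :=
    PySem.Dict.mk ((dict_of_number.getD []).map (fun p => (p.1, PySem.Dict.mk p.2)))
  -- for _, snp_count in genes_snp: …
  let d := genes_snp.foldl (fun d p =>
    let snp_count := p.2          -- int(snp_count): identity on Int
    -- if snp_count not in dict_of_number: dict_of_number[snp_count] = {}
    let d := if d.contains snp_count then d else d.insert snp_count PySem.Dict.empty
    -- if group not in dict_of_number[snp_count]: dict_of_number[snp_count][group] = 0
    let inner := d.getD snp_count PySem.Dict.empty
    let inner := if inner.contains group then inner else inner.insert group 0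
    -- dict_of_number[snp_count][group] += 1
    d.insert snp_count (inner.modify group 0 (· + 1))) d0
  d.items.map (fun p => (p.1, p.2.items))

-- ===== PORT B =====
def compile_gene_snp_alt (genes_snp : List (Int × Int)) (dict_of_number : Option (List (Int × List (String × Int)))) (group : String) : List (Int × List (String × Int)) :=
  let base := dict_of_number.getD []
  -- tally: occ[snp_count] = occ.get(snp_count, 0) + 1
  let occ : PySem.Dict Int Int :=
    genes_snp.foldl (fun t p => t.insert p.2 (t.getD p.2 0 + 1)) PySem.Dict.empty
  -- existing entries, updated where their key was tallied
  let result := base.map (fun p =>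
    let c := occ.getD p.1 0
    if c = 0 then p
    else if p.2.any (fun q => q.1 == group) then
      (p.1, p.2.map (fun q => if q.1 == group then (q.1, q.2 + c) else q))
    else (p.1, p.2 ++ [(group, c)]))
  -- brand-new keys, in first-occurrence order
  occ.items.foldl (fun res q =>
    if !(base.any (fun p => p.1 == q.1)) then res ++ [(q.1, [(group, q.2)])] else res) result

-- ===== PRECONDITION & SPEC =====
-- Pre_ excludes association lists with duplicate outer or inner keys: those do not encode any
-- Python dict argument (a Python dict cannot hold duplicate keys), so A never receives them.
def Pre_compile_gene_snp (genes_snp : List (Int × Int)) (dict_of_number : Option (List (Int × List (String × Int)))) (group : String) : Prop :=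
  ((dict_of_number.getD []).map (fun p => p.1)).Nodup ∧
    ∀ p ∈ dict_of_number.getD [], (p.2.map (fun q => q.1)).Nodup
instance (genes_snp : List (Int × Int)) (dict_of_number : Option (List (Int × List (String × Int)))) (group : String) : Decidable (Pre_compile_gene_snp genes_snp dict_of_number group) := by unfold Pre_compile_gene_snp; infer_instance
def pvWitness_compile_gene_snp : (List (Int × Int)) × (Option (List (Int × List (String × Int)))) × String :=
  ([(1, 2), (3, 2), (4, 5)], some [(2, [("g", 3)]), (7, [("h", 1)])], "g")

def Spec_compile_gene_snp (genes_snp : List (Int × Int)) (dict_of_number : Option (List (Int × List (String × Int)))) (group : String) (out : List (Int × List (String × Int))) : Prop := out = compile_gene_snp_alt genes_snp dict_of_number group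
instance (genes_snp : List (Int × Int)) (dict_of_number : Option (List (Int × List (String × Int)))) (group : String) (out : List (Int × List (String × Int))) : Decidable (Spec_compile_gene_snp genes_snp dict_of_number group out) := by unfold Spec_compile_gene_snp; infer_instance

-- ===== CLAIM (what is proved, stated in full; the proofs are below) =====
def Claim_equal_compile_gene_snp : Prop := ∀ (genes_snp : List (Int × Int)) (dict_of_number : Option (List (Int × List (String × Int)))) (group : String), Dom_compile_gene_snp genes_snp dict_of_number group → Pre_compile_gene_snp genes_snp dict_of_number group → Spec_compile_gene_snp genes_snp dict_of_number group (compile_gene_snp genes_snp dict_of_number group)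

-- ===== LEMMAS AND PROOFS =====

-- Canonical form of A's loop body: one occurrence of `group` added at key k.
def addN (group : String) (d : PySem.Dict Int (PySem.Dict String Int)) (k : Int) : PySem.Dict Int (PySem.Dict String Int) :=
  d.insert k ((d.getD k PySem.Dict.empty).insert group ((d.getD k PySem.Dict.empty).getD group 0 + 1))

lemma stepA_eq (group : String) (d : PySem.Dict Int (PySem.Dict String Int)) (k : Int) :
    (let d1 := if d.contains k then d else d.insert k PySem.Dict.empty
     let inner := d1.getD k PySem.Dict.empty
     let inner2 := if inner.contains group then inner else inner.insert group 0
     d1.insert k (inner2.modify group 0 (· + 1))) = addN group d k := by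
  by_cases hc : d.contains k = true
  · simp only [hc, if_true, addN, PySem.Dict.modify]
    by_cases hg : (d.getD k PySem.Dict.empty).contains group = true
    · simp [hg]
    · simp [hg, PySem.Dict.getD_insert_self, PySem.Dict.insert_insert_self,
        PySem.Dict.getD_of_not_contains _ _ (by simpa using hg)]
  · simp only [Bool.not_eq_true] at hc
    simp [hc, addN, PySem.Dict.modify, PySem.Dict.getD_insert_self,
      PySem.Dict.insert_insert_self, PySem.Dict.getD_of_not_contains _ _ hc,
      PySem.Dict.getD_empty, PySem.Dict.contains_empty]

lemma getD_foldl_addN (group : String) (ks : List Int) : ∀ (d : PySem.Dict Int (PySem.Dict String Int)) (k : Int),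
    (ks.foldl (fun d k => addN group d k) d).getD k PySem.Dict.empty =
      if k ∈ ks then
        (d.getD k PySem.Dict.empty).insert group ((d.getD k PySem.Dict.empty).getD group 0 + (ks.count k : Int))
      else d.getD k PySem.Dict.empty := by
  induction ks with
  | nil => intro d k; simp
  | cons c rest ih =>
    intro d k
    simp only [List.foldl_cons, ih (addN group d c) k]
    by_cases hkc : k = c
    · subst hkc
      by_cases hmem : k ∈ rest <;>
        simp [hmem, addN, PySem.Dict.getD_insert_self, PySem.Dict.insert_insert_self,
          List.count_eq_zero_of_not_mem, add_assoc, add_comm]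
    · have h2 : (addN group d c).getD k PySem.Dict.empty = d.getD k PySem.Dict.empty := by
        simp [addN, PySem.Dict.getD_insert_of_ne _ _ _ hkc]
      have hck : ¬ c = k := fun h => hkc h.symm
      by_cases hmem : k ∈ rest <;> simp [hmem, hkc, hck, h2]

-- ===== VERDICT (by name: the statement is the Claim_ definition above) =====
theorem compile_gene_snp_spec : Claim_equal_compile_gene_snp := by
  intro genes_snp dict_of_number group _ hpre
  obtain ⟨hnd, hinner⟩ := hpre
  unfold Spec_compile_gene_snp compile_gene_snp compile_gene_snp_alt
  set base := dict_of_number.getD [] with hbase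
  set counts := genes_snp.map (fun p => p.2) with hcounts
  set d0 : PySem.Dict Int (PySem.Dict String Int) :=
    PySem.Dict.mk (base.map (fun p => (p.1, PySem.Dict.mk p.2))) with hd0
  -- A's loop body is addN
  have hA : (fun (d : PySem.Dict Int (PySem.Dict String Int)) (p : Int × Int) =>
      let snp_count := p.2
      let d := if d.contains snp_count then d else d.insert snp_count PySem.Dict.empty
      let inner := d.getD snp_count PySem.Dict.empty
      let inner := if inner.contains group then inner else inner.insert group 0
      d.insert snp_count (inner.modify group 0 (· + 1))) =
      (fun d p => addN group d p.2) :=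
    funext fun d => funext fun p => stepA_eq group d p.2
  simp only [hA]
  have hfoldA : genes_snp.foldl (fun d p => addN group d p.2) d0
      = counts.foldl (fun d k => addN group d k) d0 := by
    rw [hcounts, List.foldl_map]
  rw [hfoldA]
  -- B's tally is the counter
  have htally : genes_snp.foldl (fun (t : PySem.Dict Int Int) p => t.insert p.2 (t.getD p.2 0 + 1)) PySem.Dict.empty
      = PySem.Dict.counter counts := by
    rw [← PySem.Dict.foldl_insert_getD_add_one_eq_counter, hcounts, List.foldl_map]
  rw [htally]
  -- keys facts
  have hkeys0 : d0.keys = base.map (fun p => p.1) := by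
    rw [hd0]; simp [PySem.Dict.keys, List.map_map, Function.comp_def]
  have hnd0 : d0.keys.Nodup := by rw [hkeys0]; exact hnd
  set F := counts.foldl (fun d k => addN group d k) d0 with hF
  have hkeysF : F.keys = PySem.Set.update d0.keys counts := by
    rw [hF]
    exact PySem.Dict.keys_foldl_insert counts
      (f := fun d x => ((d.getD x PySem.Dict.empty).insert group
        ((d.getD x PySem.Dict.empty).getD group 0 + 1))) d0
  have hndF : F.keys.Nodup := by
    rw [hF]
    exact PySem.Dict.nodup_keys_foldl_insert counts _ d0 hnd0
  have hitems : F.items = F.keys.map (fun k => (k, F.getD k PySem.Dict.empty)) :=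
    PySem.Dict.items_eq_map_keys F hndF PySem.Dict.empty
  rw [hitems, hkeysF, PySem.Set.update_eq_append_filter, List.map_append, List.map_append,
    List.map_map, List.map_map]
  -- second pass of B: append the fresh keys
  rw [PySem.List.foldl_append_if
    (p := fun q : Int × Int => !(base.any (fun p => p.1 == q.1)))
    (f := fun q : Int × Int => (q.1, [(group, q.2)])),
    PySem.Dict.items_counter, List.filter_map, List.map_map]
  congr 1
  -- existing entries
  · rw [hkeys0, List.map_map]
    apply List.map_congr_left
    intro p hp
    have hc : (PySem.Dict.counter counts).getD p.1 0 = (counts.count p.1 : Int) :=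
      PySem.Dict.getD_counter counts p.1
    have hd0get : d0.getD p.1 PySem.Dict.empty = PySem.Dict.mk p.2 :=
      PySem.Dict.getD_of_mem_items d0 (by rw [hd0]; exact List.mem_map_of_mem hp) hnd0 _
    have hFget := getD_foldl_addN group counts d0 p.1
    simp only [Function.comp_apply, hc]
    by_cases hmem : p.1 ∈ counts
    · have hcnt : counts.count p.1 ≠ 0 := by
        simpa [List.count_eq_zero] using hmem
      have hcnt' : ¬ ((counts.count p.1 : Int) = 0) := by exact_mod_cast hcnt
      rw [if_neg hcnt', if_pos hmem, hd0get] at *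
      rw [hFget]
      by_cases hg : (PySem.Dict.mk p.2).contains group = true
      · have hany : (p.2.any fun q => q.1 == group) = true := by
          simpa [PySem.Dict.contains_mk] using hg
        rw [if_pos hany]
        simp only [PySem.Dict.items_insert_of_contains _ _ hg]
        refine Prod.ext rfl ?_
        show List.map _ (PySem.Dict.mk p.2).items = _
        apply List.map_congr_left
        intro q hq
        by_cases hqg : (q.1 == group) = true
        · have hq1 : q.1 = group := by simpa using hqg
          have hgetq : (PySem.Dict.mk p.2).getD group 0 = q.2 :=
            PySem.Dict.getD_of_mem_items (PySem.Dict.mk p.2)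
              (show (group, q.2) ∈ p.2 by rw [← hq1]; exact hq)
              (by rw [PySem.Dict.keys_mk]; exact hinner p hp) 0
          simp [hq1, hgetq]
        · simp [hqg]
      · simp only [Bool.not_eq_true] at hg
        have hany : (p.2.any fun q => q.1 == group) = false := by
          rw [← PySem.Dict.contains_mk]; exact hg
        rw [hany]
        simp [PySem.Dict.items_insert_of_not_contains _ _ hg,
          PySem.Dict.getD_of_not_contains _ _ hg]
    · have hcnt0 : (counts.count p.1 : Int) = 0 := by
        simp [List.count_eq_zero_of_not_mem hmem]
      rw [if_pos hcnt0, hFget, if_neg hmem, hd0get]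
  -- new keys
  · have hfilt : List.filter (fun y => !PySem.Set.contains d0.keys y) (PySem.Set.ofList counts)
        = List.filter ((fun q : Int × Int => !base.any fun p => p.1 == q.1) ∘
            fun k => (k, (List.count k counts : Int))) (PySem.Set.ofList counts) := by
      apply List.filter_congr
      intro y _
      rw [hkeys0]
      have : PySem.Set.contains (base.map fun p => p.1) y = base.any fun p => p.1 == y := by
        rw [Bool.eq_iff_iff]
        simp only [PySem.Set.contains, List.any_eq_true, List.mem_map,
          beq_iff_eq, List.contains_iff_mem]
      rw [this]
      rfl
    rw [hfilt]
    apply List.map_congr_left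
    intro k hk
    have hkmem : k ∈ counts := (PySem.Set.mem_ofList counts k).mp (List.mem_of_mem_filter hk)
    have hnb : (base.any fun p => p.1 == k) = false := by
      have h := List.of_mem_filter hk
      simpa using h
    have hd0c : d0.contains k = false := by
      rw [hd0, PySem.Dict.contains_mk]
      simpa [List.any_map, Function.comp_def] using hnb
    simp only [Function.comp_apply]
    rw [getD_foldl_addN group counts d0 k, if_pos hkmem,
      PySem.Dict.getD_of_not_contains _ _ hd0c]
    simp [PySem.Dict.items_insert_of_not_contains, PySem.Dict.empty,
      PySem.Dict.getD, PySem.Dict.get?]
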